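-- pv_equiv track=rewrite | github.com/neuroinformatics-unit/datashuttle | manager/utils/utils.py | process_names
-- ===== SOURCE A (Python) =====
-- from typing import Union
--
-- def raise_error(message: str):
--     """
--     Temporary centralized way to raise and error
--     """
--     raise BaseException(message)
--
-- def process_names(names: Union[list, str], prefix: str):
--     """
--     Check a single or list of input session or subject names. First check the type is correct,
--     next prepend the prefix sub- or ses- to entries that do not have the relevant prefix. Finally,
--     check for duplicates.
--
--     :param names: str or list containing sub or ses names (e.g. to make dirs)
--     :param prefix: "sub" or "ses" - this defines the prefix checks.
--     """
--     if type(names) not in [str, list] or any(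
--         [not isinstance(ele, str) for ele in names]
--     ):
--         raise_error(
--             "Ensure subject and session names are list of strings, or string"
--         )
--         return False
--
--     if isinstance(names, str):
--         names = [names]
--
--     prefixed_names = ensure_prefixes_on_list_of_names(names, prefix)
--
--     if len(prefixed_names) != len(set(prefixed_names)):
--         raise_error(
--             "Subject and session names but all be unqiue (i.e. there are no"
--             " duplicates in list input)"
--         )
--
--     return prefixed_names
--
-- def ensure_prefixes_on_list_of_names(names, prefix):
--     """ """
--     n_chars = len(prefix)
--     return [
--         prefix + name if name[:n_chars] != prefix else name for name in names
--     ]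
-- ===== SOURCE B (Python) =====
-- def process_names(names, prefix):
--     """Single-pass variant: prefixing and duplicate detection fused into one loop
--     with a `seen` set, instead of building the full list and comparing len vs set."""
--     if type(names) not in [str, list] or any(
--         [not isinstance(ele, str) for ele in names]
--     ):
--         raise BaseException(
--             "Ensure subject and session names are list of strings, or string"
--         )
--
--     if isinstance(names, str):
--         names = [names]
--
--     n_chars = len(prefix)
--     seen = set()
--     result = []
--     for name in names:
--         prefixed = name if name[:n_chars] == prefix else prefix + name
--         if prefixed in seen:
--             raise BaseException(
--                 "Subject and session names but all be unqiue (i.e. there are no"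
--                 " duplicates in list input)"
--             )
--         seen.add(prefixed)
--         result.append(prefixed)
--     return result
-- ===== Notes on version B (the rewrite author's own statement) =====
-- stated objective: alternative
-- what changed: B fuses A's two passes (a prefixing comprehension followed by a len(list)!=len(set) duplicate check) into one traversal that maintains a seen-set and raises the same BaseException the moment a duplicate prefixed name appears.
import Mathlib
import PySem

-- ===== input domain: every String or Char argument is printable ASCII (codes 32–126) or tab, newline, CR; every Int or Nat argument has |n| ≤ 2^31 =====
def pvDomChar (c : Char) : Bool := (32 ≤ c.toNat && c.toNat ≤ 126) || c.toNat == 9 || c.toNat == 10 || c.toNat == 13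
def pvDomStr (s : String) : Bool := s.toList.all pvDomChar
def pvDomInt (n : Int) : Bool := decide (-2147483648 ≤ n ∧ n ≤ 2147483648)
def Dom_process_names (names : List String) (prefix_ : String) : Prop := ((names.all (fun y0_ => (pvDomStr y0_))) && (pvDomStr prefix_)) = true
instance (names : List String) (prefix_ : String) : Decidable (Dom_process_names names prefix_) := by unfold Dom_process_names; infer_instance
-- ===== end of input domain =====

-- B fuses A's prefixing pass and the len-vs-set duplicate check into one seen-set loop; same return value wherever A returns (duplicates, on which both raise, are outside Pre_).


-- ===== PORT A =====
-- helper ensure_prefixes_on_list_of_names: prepend prefix unless name[:n_chars] == prefix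
def ensure_prefixes_on_list_of_names (names : List String) (prefix_ : String) : List String :=
  let n_chars : Int := PySem.Str.len prefix_
  names.map (fun name =>
    if PySem.Str.slice name none (some n_chars) ≠ prefix_ then prefix_ ++ name else name)

-- The type-check guard cannot fire for names : List String; the duplicate branch raises
-- (excluded by Pre_), after which A returns prefixed_names.
def process_names (names : List String) (prefix_ : String) : List String :=
  ensure_prefixes_on_list_of_names names prefix_

-- ===== PORT B =====
-- one loop: seen set + result accumulator; the `prefixed ∈ seen` branch raises (outside Pre_)
def process_names_alt_loop (prefix_ : String) (n_chars : Int)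
    (seen : PySem.Set String) (result : List String) : List String → List String
  | [] => result
  | name :: rest =>
    let prefixed :=
      if PySem.Str.slice name none (some n_chars) = prefix_ then name
      else prefix_ ++ name
    process_names_alt_loop prefix_ n_chars (seen.add prefixed) (result ++ [prefixed]) rest

def process_names_alt (names : List String) (prefix_ : String) : List String :=
  process_names_alt_loop prefix_ (PySem.Str.len prefix_) (PySem.Set.ofList []) [] names

-- ===== PRECONDITION & SPEC =====
-- Pre_ excludes exactly the inputs on which the prefixed names contain a duplicate:
-- there both A and B raise BaseException("Subject and session names but all be unqiue …").
def Pre_process_names (names : List String) (prefix_ : String) : Prop :=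
  (names.map (fun name =>
    if PySem.Str.startswith name prefix_ then name else prefix_ ++ name)).Nodup
instance (names : List String) (prefix_ : String) : Decidable (Pre_process_names names prefix_) := by
  unfold Pre_process_names; infer_instance

def pvWitness_process_names : List String × String := (["001", "sub-002"], "sub")

def Spec_process_names (names : List String) (prefix_ : String) (out : List String) : Prop := out = process_names_alt names prefix_
instance (names : List String) (prefix_ : String) (out : List String) : Decidable (Spec_process_names names prefix_ out) := by unfold Spec_process_names; infer_instance

-- ===== CLAIM (what is proved, stated in full; the proofs are below) =====
def Claim_equal_process_names : Prop := ∀ (names : List String) (prefix_ : String), Dom_process_names names prefix_ → Pre_process_names names prefix_ → Spec_process_names names prefix_ (process_names names prefix_)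

-- ===== LEMMAS AND PROOFS =====
-- B's loop appends exactly the prefixed form of each remaining name (seen is irrelevant to the result)
theorem process_names_alt_loop_eq (prefix_ : String) (n_chars : Int)
    (seen : PySem.Set String) (result : List String) (l : List String) :
    process_names_alt_loop prefix_ n_chars seen result l =
      result ++ l.map (fun name =>
        if PySem.Str.slice name none (some n_chars) ≠ prefix_ then prefix_ ++ name
        else name) := by
  induction l generalizing seen result with
  | nil => simp [process_names_alt_loop]
  | cons name rest ih =>
    simp only [process_names_alt_loop, ih, List.map_cons, List.append_assoc,
      List.singleton_append]
    by_cases h : PySem.Str.slice name none (some n_chars) = prefix_ <;> simp [h]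

-- ===== VERDICT (by name: the statement is the Claim_ definition above) =====
theorem process_names_spec : Claim_equal_process_names := by
  intro names prefix_ _ _
  unfold Spec_process_names process_names process_names_alt ensure_prefixes_on_list_of_names
  rw [process_names_alt_loop_eq]
  simp
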